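-- pv_equiv track=rewrite | github.com/LubinMoussu/CodeBase | SemiAutomaticPubSeedAnnotation/Multi_project_scripts.py | continuous_figs
-- ===== SOURCE A (Python) =====
-- def continuous_figs(list_fig, threshold):
--         assert type(list_fig) == list
--
--         list_fig.sort()
--         prev = None
--         group = []
--         for item in list_fig:
--             if not prev or item - prev <= threshold:
--                 group.append(item)
--             else:
--                 yield group
--                 group = [item]
--             prev = item
--         if group:
--             yield group
-- ===== SOURCE B (Python) =====
-- def continuous_figs(list_fig, threshold):
--     assert type(list_fig) == list
--     list_fig.sort()
--     if not list_fig: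
--         return
--     n = len(list_fig)
--     bounds = [0] + [i for i in range(1, n) if list_fig[i] - list_fig[i - 1] > threshold] + [n]
--     for start, end in zip(bounds, bounds[1:]):
--         yield list_fig[start:end]
-- ===== Notes on version B (the rewrite author's own statement) =====
-- stated objective: alternative
-- what changed: A accumulates each group element by element with a prev/group running state; B first computes the list of break positions with one comprehension over indices, then yields slices of the sorted list between consecutive boundaries.
-- intended difference: On lists containing 0 whose sorted order has a gap > threshold immediately after a 0 (a duplicate 0 with threshold < 0, or all positive elements > threshold), A's 'not prev' truthiness slip merges the two runs into one group while B splits there; B's split is the intended threshold rule (e.g. [0,5], threshold 2: A gives [[0,5]], B gives [[0],[5]]). — e.g. on continuous_figs([0, 5], 2): A returns [[0, 5]], B returns [[0], [5]]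
import Mathlib
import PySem

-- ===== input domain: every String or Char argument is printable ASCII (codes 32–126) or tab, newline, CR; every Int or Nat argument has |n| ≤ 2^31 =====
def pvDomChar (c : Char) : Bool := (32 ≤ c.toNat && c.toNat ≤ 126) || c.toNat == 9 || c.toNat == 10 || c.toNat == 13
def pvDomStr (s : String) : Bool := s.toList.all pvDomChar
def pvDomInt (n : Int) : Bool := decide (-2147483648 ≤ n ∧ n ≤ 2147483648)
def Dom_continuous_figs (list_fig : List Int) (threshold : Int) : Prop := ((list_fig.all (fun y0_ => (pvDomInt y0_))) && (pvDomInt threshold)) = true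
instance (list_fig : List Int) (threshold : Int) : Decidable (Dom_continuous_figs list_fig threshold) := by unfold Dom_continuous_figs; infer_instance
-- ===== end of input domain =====

-- B finds the break positions with one comprehension and yields slices of the sorted list,
-- instead of A's element-by-element prev/group accumulator (objective: alternative decomposition).
-- B uses the plain gap test, so it splits after a 0 where A's `not prev` truthiness slip merges: see D_ below.
-- Both A and B sort list_fig IN PLACE; the equivalence proved here is about the yielded values.

-- ===== PORT A =====
-- one loop iteration of A: state is (prev, group, out)
def pvStepA (threshold : Int) (st : Option Int × List Int × List (List Int)) (item : Int) :
    Option Int × List Int × List (List Int) :=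
  match st with
  | (prev, group, out) =>
    match prev with
    | none => (some item, group ++ [item], out)          -- `not prev` true (prev is None)
    | some p =>
      if p = 0 ∨ item - p ≤ threshold then               -- `not prev or item - prev <= threshold`
        (some item, group ++ [item], out)
      else
        (some item, [item], out ++ [group])              -- yield group; group = [item]
def continuous_figs (list_fig : List Int) (threshold : Int) : List (List Int) :=
  let s := PySem.List.sorted list_fig (fun x => x) false
  match s.foldl (pvStepA threshold) (none, [], []) with
  | (_, group, out) => if group = [] then out else out ++ [group]   -- `if group: yield group`

-- ===== PORT B =====
def continuous_figs_alt (list_fig : List Int) (threshold : Int) : List (List Int) :=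
  let s := PySem.List.sorted list_fig (fun x => x) false
  if s = [] then []                                      -- `if not list_fig: return`
  else
    let n : Int := (s.length : Int)
    -- `[0] + [i for i in range(1, n) if list_fig[i] - list_fig[i-1] > threshold] + [n]`
    let bounds : List Int :=
      0 :: ((PySem.List.pyRange 1 n 1).filter
              (fun i => decide (PySem.List.pyGetD s i 0 - PySem.List.pyGetD s (i - 1) 0 > threshold))) ++ [n]
    -- `for start, end in zip(bounds, bounds[1:]): yield list_fig[start:end]`
    (bounds.zip bounds.tail).map (fun p => PySem.List.slice s (some p.1) (some p.2))

-- ===== PRECONDITION & SPEC =====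
-- On lists containing 0 whose sorted order puts a gap > threshold right after a 0, A's `not prev`
-- truthiness slip merges the two runs into one group, while B splits there as the threshold rule
-- intends; B's value is the intended grouping.
def D_continuous_figs (list_fig : List Int) (threshold : Int) : Prop :=
  (0 : Int) ∈ list_fig ∧
    ((threshold < 0 ∧ 2 ≤ list_fig.count 0) ∨
      ((∃ y ∈ list_fig, 0 < y) ∧ ∀ z ∈ list_fig, 0 < z → threshold < z))
instance (list_fig : List Int) (threshold : Int) : Decidable (D_continuous_figs list_fig threshold) := by
  unfold D_continuous_figs; infer_instance
def Spec_continuous_figs (list_fig : List Int) (threshold : Int) (out : List (List Int)) : Prop :=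
  ¬ D_continuous_figs list_fig threshold → out = continuous_figs_alt list_fig threshold
instance (list_fig : List Int) (threshold : Int) (out : List (List Int)) : Decidable (Spec_continuous_figs list_fig threshold out) := by
  unfold Spec_continuous_figs; infer_instance
def pvDiffWitness_continuous_figs : List Int × Int := ([0, 5], 2)
def pvDiffWitnessOut_continuous_figs : (List (List Int)) × (List (List Int)) := ([[0, 5]], [[0], [5]])

-- ===== CLAIM (what is proved, stated in full; the proofs are below) =====
def Claim_unchanged_continuous_figs : Prop := ∀ (list_fig : List Int) (threshold : Int), Dom_continuous_figs list_fig threshold → Spec_continuous_figs list_fig threshold (continuous_figs list_fig threshold)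
def Claim_exact_continuous_figs : Prop := ∀ (list_fig : List Int) (threshold : Int), Dom_continuous_figs list_fig threshold → D_continuous_figs list_fig threshold → continuous_figs list_fig threshold ≠ continuous_figs_alt list_fig threshold
def Claim_changed_continuous_figs : Prop := Dom_continuous_figs (pvDiffWitness_continuous_figs.1) (pvDiffWitness_continuous_figs.2) ∧ D_continuous_figs (pvDiffWitness_continuous_figs.1) (pvDiffWitness_continuous_figs.2) ∧ continuous_figs (pvDiffWitness_continuous_figs.1) (pvDiffWitness_continuous_figs.2) = pvDiffWitnessOut_continuous_figs.1 ∧ continuous_figs_alt (pvDiffWitness_continuous_figs.1) (pvDiffWitness_continuous_figs.2) = pvDiffWitnessOut_continuous_figs.2 ∧ pvDiffWitnessOut_continuous_figs.1 ≠ pvDiffWitnessOut_continuous_figs.2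

-- ===== LEMMAS AND PROOFS =====

-- reference groupings: pvRunLen/pvGrp use A's break test (prev ≠ 0 required), pvRunLenB/pvGrpB the plain one
def pvRunLen (p threshold : Int) : List Int → Nat
  | [] => 0
  | y :: ys => if p ≠ 0 ∧ y - p > threshold then 0 else pvRunLen y threshold ys + 1

def pvRunLenB (p threshold : Int) : List Int → Nat
  | [] => 0
  | y :: ys => if y - p > threshold then 0 else pvRunLenB y threshold ys + 1

def pvGrp (threshold : Int) : List Int → List (List Int)
  | [] => []
  | x :: xs =>
    let k := pvRunLen x threshold xs
    (x :: xs.take k) :: pvGrp threshold (xs.drop k)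
termination_by l => l.length
decreasing_by
  have : (xs.drop (pvRunLen x threshold xs)).length ≤ xs.length := by simp [List.length_drop]
  simpa using Nat.lt_succ_of_le this

def pvGrpB (threshold : Int) : List Int → List (List Int)
  | [] => []
  | x :: xs =>
    let k := pvRunLenB x threshold xs
    (x :: xs.take k) :: pvGrpB threshold (xs.drop k)
termination_by l => l.length
decreasing_by
  have : (xs.drop (pvRunLenB x threshold xs)).length ≤ xs.length := by simp [List.length_drop]
  simpa using Nat.lt_succ_of_le this

theorem pvRunLenB_le (p threshold : Int) (l : List Int) : pvRunLenB p threshold l ≤ l.length := by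
  induction l generalizing p with
  | nil => simp [pvRunLenB]
  | cons y ys ih =>
    simp only [pvRunLenB]
    split
    · simp
    · have := ih y
      simp
      omega

-- A's fold equals the reference grouping pvGrp
theorem pvLoopA_eq (threshold : Int) (l : List Int) : ∀ (p : Int) (group : List Int) (out : List (List Int)),
    group ≠ [] →
    (if (l.foldl (pvStepA threshold) (some p, group, out)).2.1 = []
     then (l.foldl (pvStepA threshold) (some p, group, out)).2.2
     else (l.foldl (pvStepA threshold) (some p, group, out)).2.2 ++ [(l.foldl (pvStepA threshold) (some p, group, out)).2.1])
    = out ++ (group ++ l.take (pvRunLen p threshold l)) :: pvGrp threshold (l.drop (pvRunLen p threshold l)) := by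
  induction l with
  | nil => intro p group out hg; simp [pvRunLen, pvGrp, hg]
  | cons y ys ih =>
    intro p group out hg
    simp only [List.foldl_cons, pvStepA, pvRunLen]
    by_cases h : p = 0 ∨ y - p ≤ threshold
    · have hc : ¬ (p ≠ 0 ∧ y - p > threshold) := by omega
      rw [if_pos h, if_neg hc]
      rw [ih y (group ++ [y]) out (by simp)]
      simp [List.append_assoc]
    · have hc : (p ≠ 0 ∧ y - p > threshold) := by omega
      rw [if_neg h, if_pos hc]
      rw [ih y [y] (out ++ [group]) (by simp)]
      simp [pvGrp, List.append_assoc]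

-- B's break-position comprehension, as a recursion over the index
def pvBreaks (s : List Int) (threshold : Int) (n : Nat) (e : Nat) : List Int :=
  if e < n then
    (if PySem.List.pyGetD s (e : Int) 0 - PySem.List.pyGetD s ((e : Int) - 1) 0 > threshold
     then ((e : Nat) : Int) :: pvBreaks s threshold n (e + 1)
     else pvBreaks s threshold n (e + 1))
  else []
termination_by n - e

theorem pvFilter_eq (s : List Int) (threshold : Int) (e : Nat) :
    (PySem.List.pyRange (e : Int) (s.length : Int) 1).filter
      (fun i => decide (PySem.List.pyGetD s i 0 - PySem.List.pyGetD s (i - 1) 0 > threshold))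
    = pvBreaks s threshold s.length e := by
  unfold pvBreaks
  by_cases h : e < s.length
  · rw [if_pos h, PySem.List.pyRange_one_cons (by omega)]
    rw [List.filter_cons]
    have : ((e : Int) + 1) = (((e + 1 : Nat)) : Int) := by push_cast; ring
    rw [this, pvFilter_eq s threshold (e + 1)]
    split_ifs with h1 h2 h2 <;> simp_all <;> omega
  · rw [if_neg h, PySem.List.pyRange_one_eq_nil (by omega)]
    simp
termination_by s.length - e

-- pvBreaks in terms of the run length after s[e-1]
theorem pvBreaks_eq (s : List Int) (threshold : Int) (e : Nat) (p : Int)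
    (h1 : 1 ≤ e) (h2 : e ≤ s.length) (hp : s[e - 1]? = some p) :
    pvBreaks s threshold s.length e =
      if e + pvRunLenB p threshold (s.drop e) < s.length
      then ((e + pvRunLenB p threshold (s.drop e) : Nat) : Int) ::
             pvBreaks s threshold s.length (e + pvRunLenB p threshold (s.drop e) + 1)
      else [] := by
  by_cases h : e < s.length
  · have hd : s.drop e = s[e] :: s.drop (e + 1) := List.drop_eq_getElem_cons h
    have hgp : PySem.List.pyGetD s ((e : Int) - 1) 0 = p := by
      have he1 : ((e : Int) - 1) = ((e - 1 : Nat) : Int) := by omega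
      rw [he1, PySem.List.pyGetD_natCast]
      simp [List.getD, hp]
    have hge : PySem.List.pyGetD s (e : Int) 0 = s[e] := by
      rw [PySem.List.pyGetD_natCast]
      simp [List.getD, List.getElem?_eq_getElem h]
    rw [hd]
    simp only [pvRunLenB]
    by_cases hbr : s[e] - p > threshold
    · rw [if_pos hbr]
      conv_lhs => unfold pvBreaks
      rw [if_pos h, if_pos (by rw [hgp, hge]; exact hbr)]
      simp [h]
    · rw [if_neg hbr]
      conv_lhs => unfold pvBreaks
      rw [if_pos h, if_neg (by rw [hgp, hge]; exact hbr)]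
      rw [pvBreaks_eq s threshold (e + 1) s[e] (by omega) (by omega)
            (by simp [List.getElem?_eq_getElem h])]
      have harith : e + 1 + pvRunLenB s[e] threshold (s.drop (e + 1))
          = e + (pvRunLenB s[e] threshold (s.drop (e + 1)) + 1) := by omega
      rw [harith]
  · have he : e = s.length := by omega
    subst he
    have : s.drop s.length = [] := by simp
    rw [this]
    unfold pvBreaks
    simp [pvRunLenB]
termination_by s.length - e

-- the zip(bounds, bounds[1:]) slicing
def pvSlices (s : List Int) (bs : List Int) : List (List Int) :=
  (bs.zip bs.tail).map (fun p => PySem.List.slice s (some p.1) (some p.2))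

theorem pvSlices_cons (s : List Int) (a b : Int) (rest : List Int) :
    pvSlices s (a :: b :: rest) = PySem.List.slice s (some a) (some b) :: pvSlices s (b :: rest) := by
  simp [pvSlices]

theorem pvSlices_eq (s : List Int) (threshold : Int) (a : Nat) (ha : a < s.length) :
    pvSlices s ((a : Int) :: (pvBreaks s threshold s.length (a + 1) ++ [(s.length : Int)]))
      = pvGrpB threshold (s.drop a) := by
  have hd : s.drop a = s[a] :: s.drop (a + 1) := List.drop_eq_getElem_cons ha
  have hB := pvBreaks_eq s threshold (a + 1) s[a] (by omega) (by omega)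
      (by simp [List.getElem?_eq_getElem ha])
  set k := pvRunLenB s[a] threshold (s.drop (a + 1)) with hk
  have hkle : k ≤ s.length - (a + 1) := by
    have := pvRunLenB_le s[a] threshold (s.drop (a + 1))
    simpa [List.length_drop] using this
  have hgrp : pvGrpB threshold (s.drop a)
      = (s[a] :: (s.drop (a + 1)).take k) :: pvGrpB threshold (s.drop (a + 1 + k)) := by
    rw [hd]
    simp only [pvGrpB]
    rw [← hk, List.drop_drop]
  have hslice : PySem.List.slice s (some (a : Int)) (some ((a + 1 + k : Nat) : Int))
      = s[a] :: (s.drop (a + 1)).take k := by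
    calc PySem.List.slice s (some (a : Int)) (some ((a + 1 + k : Nat) : Int))
        = (s.drop a).take (1 + k) := by
          rw [show ((a + 1 + k : Nat) : Int) = ((a : Nat) : Int) + ((1 + k : Nat) : Int) from by
                push_cast; ring,
              PySem.List.slice_natCast_add]
      _ = s[a] :: (s.drop (a + 1)).take k := by
          rw [hd, Nat.add_comm 1 k, List.take_succ_cons]
  by_cases hcase : a + 1 + k < s.length
  · rw [hB, if_pos hcase]
    rw [List.cons_append, pvSlices_cons, hslice, hgrp]
    congr 1
    have := pvSlices_eq s threshold (a + 1 + k) hcase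
    simpa using this
  · rw [hB, if_neg hcase]
    have hkeq : k = s.length - (a + 1) := by omega
    rw [List.nil_append, pvSlices_cons]
    have hfull : PySem.List.slice s (some (a : Int)) (some ((s.length : Nat) : Int)) = s.drop a := by
      rw [PySem.List.slice_natCast]
      apply List.take_of_length_le
      simp
    have hlast : pvSlices s [((s.length : Nat) : Int)] = [] := by simp [pvSlices]
    rw [hfull, hlast, hgrp]
    have htake : (s.drop (a + 1)).take k = s.drop (a + 1) := by
      apply List.take_of_length_le
      simp [hkeq]
    have hdropk : s.drop (a + 1 + k) = [] := by
      apply List.drop_eq_nil_of_le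
      omega
    rw [htake, hdropk, hd]
    simp [pvGrpB]
termination_by s.length - a
decreasing_by omega

-- B equals the reference grouping pvGrpB of the sorted list
theorem pvAlt_eq (list_fig : List Int) (threshold : Int) :
    continuous_figs_alt list_fig threshold
      = pvGrpB threshold (PySem.List.sorted list_fig (fun x => x) false) := by
  unfold continuous_figs_alt
  cases h : PySem.List.sorted list_fig (fun x => x) false with
  | nil => simp [pvGrpB]
  | cons x xs =>
    rw [if_neg (by simp)]
    have hlen : 0 < (x :: xs).length := by simp
    have hfe := pvFilter_eq (x :: xs) threshold 1
    have h1 : ((1 : Int)) = ((1 : Nat) : Int) := by norm_num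
    have := pvSlices_eq (x :: xs) threshold 0 hlen
    simp only [Nat.cast_zero, List.drop_zero, Nat.zero_add] at this
    calc pvSlices (x :: xs)
          (0 :: ((PySem.List.pyRange 1 ((x :: xs).length : Int) 1).filter
              (fun i => decide (PySem.List.pyGetD (x :: xs) i 0 - PySem.List.pyGetD (x :: xs) (i - 1) 0 > threshold))) ++ [((x :: xs).length : Int)])
        = pvSlices (x :: xs) (((0 : Nat) : Int) :: (pvBreaks (x :: xs) threshold (x :: xs).length (0 + 1) ++ [((x :: xs).length : Int)])) := by
          rw [← hfe]; norm_num
      _ = pvGrpB threshold (x :: xs) := this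

-- A equals the reference grouping pvGrp of the sorted list
theorem pvA_eq (list_fig : List Int) (threshold : Int) :
    continuous_figs list_fig threshold
      = pvGrp threshold (PySem.List.sorted list_fig (fun x => x) false) := by
  unfold continuous_figs
  cases h : PySem.List.sorted list_fig (fun x => x) false with
  | nil => simp [pvGrp]
  | cons x xs =>
    simp only [List.foldl_cons, pvStepA]
    have := pvLoopA_eq threshold xs x [x] [] (by simp)
    simp only [List.nil_append] at *
    rw [this]
    simp [pvGrp]

-- the two break tests agree along every adjacent pair satisfying `a = 0 → b ≤ threshold`
theorem pvRunLen_congr (threshold : Int) (l : List Int) : ∀ p : Int,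
    List.IsChain (fun a b => a = 0 → b ≤ threshold) (p :: l) →
    pvRunLen p threshold l = pvRunLenB p threshold l := by
  induction l with
  | nil => intro p _; rfl
  | cons y ys ih =>
    intro p hc
    have hpy : p = 0 → y ≤ threshold := (List.isChain_cons.mp hc).1 y (by simp)
    have htail : List.IsChain (fun a b => a = 0 → b ≤ threshold) (y :: ys) := (List.isChain_cons.mp hc).2
    simp only [pvRunLen, pvRunLenB]
    by_cases hp : p = 0
    · rw [if_neg (by omega), if_neg (by have := hpy hp; omega)]
      rw [ih y htail]
    · by_cases hbr : y - p > threshold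
      · rw [if_pos ⟨hp, hbr⟩, if_pos hbr]
      · rw [if_neg (by tauto), if_neg hbr]
        rw [ih y htail]

theorem pvIsChain_drop {α : Type} {R : α → α → Prop} (k : Nat) (l : List α)
    (h : List.IsChain R l) : List.IsChain R (l.drop k) := by
  induction k generalizing l with
  | zero => simpa using h
  | succ n ih =>
    cases l with
    | nil => simp
    | cons x xs => exact ih xs h.tail

theorem pvGrp_congr (threshold : Int) (l : List Int)
    (h : List.IsChain (fun a b => a = 0 → b ≤ threshold) l) :
    pvGrp threshold l = pvGrpB threshold l := by
  match l with
  | [] => simp [pvGrp, pvGrpB]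
  | x :: xs =>
    simp only [pvGrp, pvGrpB]
    rw [pvRunLen_congr threshold xs x h]
    congr 1
    have hdrop : List.IsChain (fun a b => a = 0 → b ≤ threshold) (xs.drop (pvRunLenB x threshold xs)) :=
      pvIsChain_drop _ xs h.tail
    exact pvGrp_congr threshold _ hdrop
termination_by l.length
decreasing_by
  simp [List.length_drop]

-- outside D_, the sorted list has no adjacent pair (0, b) with b > threshold
theorem pvSorted_chain (list_fig : List Int) (threshold : Int)
    (h : ¬ D_continuous_figs list_fig threshold) :
    List.IsChain (fun a b => a = 0 → b ≤ threshold)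
      (PySem.List.sorted list_fig (fun x => x) false) := by
  set S := PySem.List.sorted list_fig (fun x => x) false with hS
  have hperm : S.Perm list_fig := PySem.List.sorted_perm list_fig (fun x => x) false
  have hpw : S.Pairwise (· ≤ ·) := by
    have := PySem.List.sorted_pairwise (xs := list_fig) (key := fun x => x)
    simpa using this
  rw [List.isChain_iff_getElem]
  intro i hi ha
  by_contra hb
  rw [Int.not_le] at hb
  apply h
  have hgw : ∀ p q : Nat, ∀ (hpq : p < q) (hq : q < S.length), S[p]'(Nat.lt_trans hpq hq) ≤ S[q] := by
    intro p q hpq hq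
    exact List.pairwise_iff_getElem.mp hpw p q (Nat.lt_trans hpq hq) hq hpq
  have h0 : (0 : Int) ∈ list_fig := by
    rw [← hperm.mem_iff, ← ha]
    exact List.getElem_mem _
  refine ⟨h0, ?_⟩
  by_cases hz : S[i + 1] = 0
  · left
    constructor
    · omega
    · have hcnt : S.count 0 = list_fig.count 0 := hperm.count_eq 0
      rw [← hcnt]
      have hsplit : S = S.take (i + 1) ++ S.drop (i + 1) := (List.take_append_drop _ _).symm
      rw [hsplit, List.count_append]
      have hm1 : (0 : Int) ∈ S.take (i + 1) := by
        rw [← ha]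
        have : (S.take (i + 1))[i]'(by simp; omega) = S[i] := List.getElem_take
        rw [← this]
        exact List.getElem_mem _
      have hm2 : (0 : Int) ∈ S.drop (i + 1) := by
        rw [← hz]
        have : (S.drop (i + 1))[0]'(by simp; omega) = S[i + 1] := by
          rw [List.getElem_drop]
        rw [← this]
        exact List.getElem_mem _
      have c1 := List.count_pos_iff.mpr hm1
      have c2 := List.count_pos_iff.mpr hm2
      omega
  · right
    have hpos : 0 < S[i + 1] := by
      have := hgw i (i + 1) (by omega) hi
      rw [ha] at this
      omega
    constructor
    · exact ⟨S[i + 1], by rw [← hperm.mem_iff]; exact List.getElem_mem _, hpos⟩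
    · intro z hz0 hzpos
      have hzS : z ∈ S := hperm.mem_iff.mpr hz0
      obtain ⟨j, hj, hjz⟩ := List.mem_iff_getElem.mp hzS
      have hij : i < j := by
        by_contra hle
        rw [Nat.not_lt] at hle
        by_cases hji : j = i
        · subst hji; rw [hjz] at ha; omega
        · have := hgw j i (by omega) (by omega)
          rw [hjz, ha] at this
          omega
      have : S[i + 1] ≤ z := by
        by_cases hji : j = i + 1
        · subst hji; omega
        · have := hgw (i + 1) j (by omega) hj
          rw [hjz] at this
          exact this
      omega

-- equal outputs force equal run lengths level by level, hence no adjacent pair (0, b) with b > threshold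
theorem pvRunLen_le (p threshold : Int) (l : List Int) : pvRunLen p threshold l ≤ l.length := by
  induction l generalizing p with
  | nil => simp [pvRunLen]
  | cons y ys ih =>
    simp only [pvRunLen]
    split
    · simp
    · have := ih y
      simp
      omega

theorem pvRun_chain (threshold : Int) : ∀ (ys : List Int) (p : Int),
    pvRunLen p threshold ys = pvRunLenB p threshold ys →
    List.IsChain (fun a b => a = 0 → b ≤ threshold) (p :: ys.take (pvRunLenB p threshold ys + 1)) := by
  intro ys
  induction ys with
  | nil => intro p _; simp
  | cons y ys ih =>
    intro p heq
    simp only [pvRunLen, pvRunLenB] at heq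
    by_cases hbrB : y - p > threshold
    · by_cases hp : p = 0
      · rw [if_neg (by tauto)] at heq
        rw [if_pos hbrB] at heq
        omega
      · simp only [pvRunLenB]
        rw [if_pos hbrB]
        simp [List.isChain_cons, hp]
    · rw [if_neg hbrB, if_neg (by tauto)] at heq
      have heq' : pvRunLen y threshold ys = pvRunLenB y threshold ys := by omega
      have hch := ih y heq'
      simp only [pvRunLenB]
      rw [if_neg hbrB, List.take_succ_cons, List.isChain_cons]
      constructor
      · intro z hz
        simp only [List.head?_cons, Option.mem_def, Option.some.injEq] at hz
        subst hz
        intro hp0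
        omega
      · exact hch

theorem pvGrpEq_chain (threshold : Int) (l : List Int)
    (heq : pvGrp threshold l = pvGrpB threshold l) :
    List.IsChain (fun a b => a = 0 → b ≤ threshold) l := by
  match l with
  | [] => simp
  | x :: xs =>
    simp only [pvGrp, pvGrpB] at heq
    have hgroup : xs.take (pvRunLen x threshold xs) = xs.take (pvRunLenB x threshold xs) := by
      have := (List.cons.injEq _ _ _ _).mp heq
      have h1 := this.1
      exact (List.cons.injEq _ _ _ _).mp h1 |>.2
    have hk : pvRunLen x threshold xs = pvRunLenB x threshold xs := by
      have hA := pvRunLen_le x threshold xs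
      have hB := pvRunLenB_le x threshold xs
      have := congrArg List.length hgroup
      simp only [List.length_take] at this
      omega
    have htail : pvGrp threshold (xs.drop (pvRunLenB x threshold xs))
        = pvGrpB threshold (xs.drop (pvRunLenB x threshold xs)) := by
      have := (List.cons.injEq _ _ _ _).mp heq
      have h2 := this.2
      rw [hk] at h2
      exact h2
    have chain1 := pvRun_chain threshold xs x hk
    have chainTail := pvGrpEq_chain threshold (xs.drop (pvRunLenB x threshold xs)) htail
    have hsplit : x :: xs = (x :: xs.take (pvRunLenB x threshold xs)) ++ xs.drop (pvRunLenB x threshold xs) := by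
      rw [List.cons_append, List.take_append_drop]
    have h1 : x :: xs.take (pvRunLenB x threshold xs + 1)
        = (x :: xs.take (pvRunLenB x threshold xs)) ++ (xs[pvRunLenB x threshold xs]?.toList) := by
      rw [List.take_succ, List.cons_append]
    rw [h1, List.isChain_append] at chain1
    rw [hsplit, List.isChain_append]
    refine ⟨chain1.1, chainTail, ?_⟩
    intro a ha b hb
    apply chain1.2.2 a ha
    rw [List.head?_drop] at hb
    cases hxk : xs[pvRunLenB x threshold xs]? with
    | none => rw [hxk] at hb; simp at hb
    | some v =>
      rw [hxk] at hb
      simp only [Option.mem_def, Option.some.injEq] at hb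
      subst hb
      simp [hxk]
termination_by l.length
decreasing_by simp [List.length_drop]

theorem pvCount2 : ∀ (S : List Int), 2 ≤ S.count 0 → ∃ i j : Nat, i < j ∧ S[i]? = some 0 ∧ S[j]? = some 0 := by
  intro S
  induction S with
  | nil => simp
  | cons x xs ih =>
    intro h
    by_cases hx : x = 0
    · subst hx
      have h1 : (0 : Int) ∈ xs := by
        apply List.count_pos_iff.mp
        rw [List.count_cons_self] at h
        omega
      obtain ⟨j, hj⟩ := List.mem_iff_getElem?.mp h1
      exact ⟨0, j + 1, by omega, by simp, by simpa using hj⟩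
    · have h2 : 2 ≤ xs.count 0 := by
        simpa [List.count_cons, hx] using h
      obtain ⟨i, j, hij, hi, hj⟩ := ih h2
      exact ⟨i + 1, j + 1, by omega, by simpa using hi, by simpa using hj⟩

theorem pvNoZero (S : List Int) (threshold : Int)
    (hpw : S.Pairwise (· ≤ ·))
    (hchain : List.IsChain (fun a b => a = 0 → b ≤ threshold) S)
    (hposs : ∀ z ∈ S, 0 < z → threshold < z)
    (hy : ∃ y ∈ S, 0 < y)
    (i : Nat) (hi : i < S.length) (h0 : S[i] = 0) : False := by
  obtain ⟨y, hyS, hypos⟩ := hy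
  obtain ⟨jy, hjy, hjyeq⟩ := List.mem_iff_getElem.mp hyS
  have hgw : ∀ p q : Nat, ∀ (hpq : p < q) (hq : q < S.length), S[p]'(Nat.lt_trans hpq hq) ≤ S[q] := by
    intro p q hpq hq
    exact List.pairwise_iff_getElem.mp hpw p q (Nat.lt_trans hpq hq) hq hpq
  have hi1 : i + 1 < S.length := by
    by_contra hc
    rcases Nat.lt_or_ge jy i with hlt | hge
    · have := hgw jy i hlt hi
      omega
    · have hji : jy = i := by omega
      subst hji
      omega
  have hble : S[i + 1] ≤ threshold := List.isChain_iff_getElem.mp hchain i hi1 h0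
  have hbge : 0 ≤ S[i + 1] := by
    have := hgw i (i + 1) (by omega) hi1
    omega
  by_cases hb : S[i + 1] = 0
  · exact pvNoZero S threshold hpw hchain hposs ⟨y, hyS, hypos⟩ (i + 1) hi1 hb
  · have hbp : 0 < S[i + 1] := by omega
    have := hposs S[i + 1] (List.getElem_mem hi1) hbp
    omega
termination_by S.length - i

-- ===== VERDICT (by name: the statement is the Claim_ definition above) =====
theorem continuous_figs_spec : Claim_unchanged_continuous_figs := by
  intro list_fig threshold _
  unfold Spec_continuous_figs
  intro hD
  rw [pvA_eq, pvAlt_eq]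
  exact pvGrp_congr threshold _ (pvSorted_chain list_fig threshold hD)

theorem continuous_figs_changed : Claim_changed_continuous_figs := by
  unfold Claim_changed_continuous_figs; decide

theorem continuous_figs_tight : Claim_exact_continuous_figs := by
  intro list_fig threshold _ hD heq
  rw [pvA_eq, pvAlt_eq] at heq
  set S := PySem.List.sorted list_fig (fun x => x) false with hS
  have hchain := pvGrpEq_chain threshold S heq
  have hperm : S.Perm list_fig := PySem.List.sorted_perm list_fig (fun x => x) false
  have hpw : S.Pairwise (· ≤ ·) := by
    have := PySem.List.sorted_pairwise (xs := list_fig) (key := fun x => x)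
    simpa using this
  obtain ⟨h0mem, hcase⟩ := hD
  have h0S : (0 : Int) ∈ S := hperm.mem_iff.mpr h0mem
  obtain ⟨i0, hi0, hi0eq⟩ := List.mem_iff_getElem.mp h0S
  rcases hcase with ⟨ht, hcnt⟩ | ⟨⟨y, hyl, hypos⟩, hall⟩
  · have hcntS : 2 ≤ S.count 0 := by
      rw [hperm.count_eq]
      exact hcnt
    obtain ⟨i, j, hij, hi?, hj?⟩ := pvCount2 S hcntS
    obtain ⟨hjlen, hjeq⟩ := List.getElem?_eq_some_iff.mp hj?
    obtain ⟨hilen, hieq⟩ := List.getElem?_eq_some_iff.mp hi?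
    have hi1 : i + 1 < S.length := by omega
    have hgw : ∀ p q : Nat, ∀ (hpq : p < q) (hq : q < S.length), S[p]'(Nat.lt_trans hpq hq) ≤ S[q] := by
      intro p q hpq hq
      exact List.pairwise_iff_getElem.mp hpw p q (Nat.lt_trans hpq hq) hq hpq
    have h01 : S[i + 1] = 0 := by
      have hup : S[i + 1] ≤ 0 := by
        rcases Nat.lt_or_ge (i + 1) j with hlt | hge
        · have := hgw (i + 1) j hlt hjlen
          omega
        · have : i + 1 = j := by omega
          subst this
          omega
      have hlow : 0 ≤ S[i + 1] := by
        have := hgw i (i + 1) (by omega) hi1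
        omega
      omega
    have := List.isChain_iff_getElem.mp hchain i hi1 hieq
    rw [h01] at this
    omega
  · have hyS : y ∈ S := hperm.mem_iff.mpr hyl
    have hpossS : ∀ z ∈ S, 0 < z → threshold < z := fun z hz hzpos => hall z (hperm.mem_iff.mp hz) hzpos
    exact pvNoZero S threshold hpw hchain hpossS ⟨y, hyS, hypos⟩ i0 hi0 hi0eq
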